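-- pv_equiv track=rewrite | github.com/LiujiChen/CQU-SE-Introduce-of-AI | 2_experiment/Demo/Population.py | bestGeneration
-- ===== SOURCE A (Python) =====
-- from copy import deepcopy
--
-- def bestGeneration(population_fitness, population_chromosome):
--     fitness = deepcopy(population_fitness)
--     fitness.sort(reverse=True)
--     best_fitness = fitness[0]
--     index = population_fitness.index(best_fitness)
--     best_chromosome = population_chromosome[index]
--     best_grey = 0
--     for i in range(len(best_chromosome)):
--         best_grey = best_grey + best_chromosome[i] * 2 ** (len(best_chromosome) - i - 1)
--     return best_grey, best_chromosome, best_fitness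
-- ===== SOURCE B (Python) =====
-- def bestGeneration(population_fitness, population_chromosome):
--     best_fitness = max(population_fitness)
--     best_chromosome = population_chromosome[population_fitness.index(best_fitness)]
--     best_grey = 0
--     for bit in best_chromosome:
--         best_grey = best_grey * 2 + bit
--     return best_grey, best_chromosome, best_fitness
-- ===== Notes on version B (the rewrite author's own statement) =====
-- stated objective: simpler
-- what changed: Replaces the deepcopy+descending-sort used to obtain the maximum fitness by a single max() pass, and replaces the positional-power decode (2**(len-i-1) per bit) by a Horner accumulator over the bits.
import Mathlib
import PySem

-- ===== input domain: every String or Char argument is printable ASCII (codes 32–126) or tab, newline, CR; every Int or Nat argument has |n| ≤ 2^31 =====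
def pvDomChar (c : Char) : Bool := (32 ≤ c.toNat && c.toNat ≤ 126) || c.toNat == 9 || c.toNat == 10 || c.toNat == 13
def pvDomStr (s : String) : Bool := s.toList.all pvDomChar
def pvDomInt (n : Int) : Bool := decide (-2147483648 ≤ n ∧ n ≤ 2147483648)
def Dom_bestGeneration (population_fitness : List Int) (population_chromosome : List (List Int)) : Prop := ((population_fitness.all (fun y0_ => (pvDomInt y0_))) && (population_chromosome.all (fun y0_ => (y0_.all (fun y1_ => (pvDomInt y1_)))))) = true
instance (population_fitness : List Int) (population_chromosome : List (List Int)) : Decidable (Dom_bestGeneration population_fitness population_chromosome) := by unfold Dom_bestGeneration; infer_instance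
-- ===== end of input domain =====

-- B replaces the deepcopy+descending-sort max-finding by a single max() pass and the
-- positional-power decode by a Horner accumulator (objective: simpler; return value only).

-- ===== PORT A =====
def bestGeneration (population_fitness : List Int) (population_chromosome : List (List Int)) : Int × List Int × Int :=
  let fitness := PySem.List.sorted population_fitness (fun x => x) true
  let best_fitness := (PySem.List.pyGet? fitness 0).getD 0
  let index := (PySem.List.index? population_fitness best_fitness).getD 0
  let best_chromosome := (PySem.List.pyGet? population_chromosome (index : Int)).getD []
  let n : Int := best_chromosome.length
  let best_grey := (PySem.List.pyRange 0 n 1).foldl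
      (fun g i => g + PySem.List.pyGetD best_chromosome i 0 * 2 ^ (n - i - 1).toNat) 0
  (best_grey, best_chromosome, best_fitness)

-- ===== PORT B =====
def bestGeneration_alt (population_fitness : List Int) (population_chromosome : List (List Int)) : Int × List Int × Int :=
  let best_fitness := (PySem.List.max? population_fitness (fun x => x)).getD 0
  let best_chromosome := (PySem.List.pyGet? population_chromosome
      ((PySem.List.index? population_fitness best_fitness).getD 0 : Int)).getD []
  let best_grey := best_chromosome.foldl (fun g b => g * 2 + b) 0
  (best_grey, best_chromosome, best_fitness)

-- ===== PRECONDITION & SPEC =====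
-- A raises on an empty fitness list (IndexError) and when the first index of the maximal
-- fitness is not a valid index into population_chromosome (IndexError); Pre_ excludes exactly those.
def Pre_bestGeneration (population_fitness : List Int) (population_chromosome : List (List Int)) : Prop :=
  population_fitness ≠ [] ∧
  (PySem.List.index? population_fitness
      ((PySem.List.max? population_fitness (fun x => x)).getD 0)).getD 0 < population_chromosome.length
instance (population_fitness : List Int) (population_chromosome : List (List Int)) : Decidable (Pre_bestGeneration population_fitness population_chromosome) := by unfold Pre_bestGeneration; infer_instance

def pvWitness_bestGeneration : List Int × List (List Int) := ([3, 7, 7, 1], [[1, 0], [1, 1], [0, 1], []])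

def Spec_bestGeneration (population_fitness : List Int) (population_chromosome : List (List Int)) (out : Int × List Int × Int) : Prop := out = bestGeneration_alt population_fitness population_chromosome
instance (population_fitness : List Int) (population_chromosome : List (List Int)) (out : Int × List Int × Int) : Decidable (Spec_bestGeneration population_fitness population_chromosome out) := by unfold Spec_bestGeneration; infer_instance

-- ===== CLAIM (what is proved, stated in full; the proofs are below) =====
def Claim_equal_bestGeneration : Prop := ∀ (population_fitness : List Int) (population_chromosome : List (List Int)), Dom_bestGeneration population_fitness population_chromosome → Pre_bestGeneration population_fitness population_chromosome → Spec_bestGeneration population_fitness population_chromosome (bestGeneration population_fitness population_chromosome)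

-- ===== LEMMAS AND PROOFS =====

-- The value both decode loops compute: Σ bit_i * 2^(len-1-i).
def pvVal : List Int → Int
  | [] => 0
  | b :: t => b * 2 ^ t.length + pvVal t

-- Horner's loop computes pvVal.
theorem pvHorner (c : List Int) (a : Int) :
    c.foldl (fun g b => g * 2 + b) a = a * 2 ^ c.length + pvVal c := by
  induction c generalizing a with
  | nil => simp [pvVal]
  | cons b t ih =>
    simp only [List.foldl_cons, pvVal, List.length_cons, ih]
    ring

-- A's indexed positional-power loop, phrased over enumerate, computes pvVal.
theorem pvPowLoop (c : List Int) (s : Int) (a N : Int) (h : N = s + c.length) :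
    (PySem.List.enumerate c s).foldl (fun g p => g + p.2 * 2 ^ (N - p.1 - 1).toNat) a
      = a + pvVal c := by
  induction c generalizing s a with
  | nil => simp [PySem.List.enumerate_nil, pvVal]
  | cons b t ih =>
    rw [PySem.List.enumerate_cons]
    simp only [List.foldl_cons]
    rw [ih (s + 1) _ (by simp at h ⊢; omega)]
    have he : (N - s - 1).toNat = t.length := by
      simp at h; omega
    simp only [pvVal, he]
    ring

-- A's best_fitness (head of the descending sort) is B's best_fitness (max?).
theorem pvMaxEq (pf : List Int) (h : pf ≠ []) :
    (PySem.List.pyGet? (PySem.List.sorted pf (fun x => x) true) 0).getD 0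
      = (PySem.List.max? pf (fun x => x)).getD 0 := by
  obtain ⟨x, t, rfl⟩ := List.exists_cons_of_ne_nil h
  obtain ⟨m, s, hs⟩ : ∃ m s, PySem.List.sorted (x :: t) (fun x => x) true = m :: s := by
    have hp := PySem.List.sorted_perm (x :: t) (fun x => x) true
    cases hsrt : PySem.List.sorted (x :: t) (fun x => x) true with
    | nil => rw [hsrt] at hp; exact absurd hp.symm.eq_nil (by simp)
    | cons m s => exact ⟨m, s, rfl⟩
  rw [hs]
  have hM : PySem.List.max? (x :: t) (fun x => x) = some (t.foldl max x) :=
    PySem.List.max?_id_cons x t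
  rw [hM]
  simp only [PySem.List.pyGet?_zero_cons, Option.getD_some]
  have hmem : m ∈ x :: t := by
    have hp := PySem.List.sorted_perm (x :: t) (fun x => x) true
    rw [hs] at hp
    exact hp.mem_iff.mp (List.mem_cons_self ..)
  have hub := PySem.List.key_head_sorted_rev_ge (xs := x :: t) (key := fun x => x) hs
  exact le_antisymm (PySem.List.max?_isMax hM m hmem) (hub _ (PySem.List.max?_mem hM))

-- ===== VERDICT (by name: the statement is the Claim_ definition above) =====
theorem bestGeneration_spec : Claim_equal_bestGeneration := by
  intro pf pc _ hpre
  obtain ⟨hne, _⟩ := hpre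
  simp only [Spec_bestGeneration, bestGeneration, bestGeneration_alt]
  rw [pvMaxEq pf hne]
  set bf := (PySem.List.max? pf (fun x => x)).getD 0 with hbf
  set c := (PySem.List.pyGet? pc ((PySem.List.index? pf bf).getD 0 : Int)).getD [] with hc
  refine Prod.ext ?_ rfl
  -- grey values: A's power loop = Horner
  show (PySem.List.pyRange 0 (c.length : Int) 1).foldl
      (fun g i => g + PySem.List.pyGetD c i 0 * 2 ^ ((c.length : Int) - i - 1).toNat) 0
    = c.foldl (fun g b => g * 2 + b) 0
  have hen := PySem.List.enumerate_eq_map_pyRange (xs := c) (d := (0 : Int))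
  calc (PySem.List.pyRange 0 (c.length : Int) 1).foldl
        (fun g i => g + PySem.List.pyGetD c i 0 * 2 ^ ((c.length : Int) - i - 1).toNat) 0
      = (PySem.List.enumerate c 0).foldl
        (fun g p => g + p.2 * 2 ^ ((c.length : Int) - p.1 - 1).toNat) 0 := by
        rw [hen, List.foldl_map]
        rfl
    _ = 0 + pvVal c := pvPowLoop c 0 0 _ (by simp)
    _ = c.foldl (fun g b => g * 2 + b) 0 := by rw [pvHorner]; ring
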